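-- pv_equiv track=rewrite | github.com/CDBiddulph/scaffold-learning | src/scaffold_learning/domains/crosswords/score/score_strict.py | _find_clue_position
-- ===== SOURCE A (Python) =====
-- def _find_clue_position(clue_num, grid, direction):
--     """Find the starting position of a clue in the grid based on numbering logic"""
--     height = len(grid)
--     width = len(grid[0]) if height > 0 else 0
--
--     current_num = 1
--
--     for row in range(height):
--         for col in range(width):
--             # Skip black squares
--             if grid[row][col] == ".":
--                 continue
--
--             # Check if this position starts a word
--             starts_across = (
--                 (col == 0 or grid[row][col - 1] == ".")
--                 and col + 1 < width
--                 and grid[row][col + 1] != "."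
--             )
--             starts_down = (
--                 (row == 0 or grid[row - 1][col] == ".")
--                 and row + 1 < height
--                 and grid[row + 1][col] != "."
--             )
--
--             if starts_across or starts_down:
--                 if current_num == clue_num:
--                     return (row, col)
--                 current_num += 1
--
--     return None
-- ===== SOURCE B (Python) =====
-- def _run_starts(line, i):
--     """Start indices (offset by i) of maximal runs of >= 2 consecutive non-'.' cells."""
--     if not line:
--         return []
--     if line[0] == ".":
--         return _run_starts(line[1:], i + 1)
--     k = 1
--     while k < len(line) and line[k] != ".":
--         k += 1
--     tail = _run_starts(line[k:], i + k)
--     return [i] + tail if k >= 2 else tail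
--
--
-- def _find_clue_position(clue_num, grid, direction):
--     """Decompose rows/columns into maximal runs: a word starts exactly at the first
--     cell of a run of length >= 2, so collect those, order them, and take the nth."""
--     height = len(grid)
--     width = len(grid[0]) if height > 0 else 0
--     rows = [row[:width] for row in grid]
--     downs = [[] for _ in range(height)]
--     for c in range(width):
--         for r in _run_starts([rows[r][c] for r in range(height)], 0):
--             downs[r].append(c)
--     positions = [
--         (r, c)
--         for r in range(height)
--         for c in sorted(set(_run_starts(rows[r], 0) + downs[r]))
--     ]
--     return positions[clue_num - 1] if 1 <= clue_num <= len(positions) else None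
-- ===== Notes on version B (the rewrite author's own statement) =====
-- stated objective: alternative
-- what changed: Replaces A's per-cell neighbour test with run decomposition: each row and each column is split into maximal runs of non-'.' cells (a word starts exactly at the first cell of a run of length >= 2); the column starts are inverted into per-row lists, each row's start columns are ordered, and the clue_num-th start is returned.
-- outside the precondition, e.g. on _find_clue_position(1, [['A', 'A'], ['A']], 'across'): A returns (0, 0), B raises IndexError
import Mathlib
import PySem

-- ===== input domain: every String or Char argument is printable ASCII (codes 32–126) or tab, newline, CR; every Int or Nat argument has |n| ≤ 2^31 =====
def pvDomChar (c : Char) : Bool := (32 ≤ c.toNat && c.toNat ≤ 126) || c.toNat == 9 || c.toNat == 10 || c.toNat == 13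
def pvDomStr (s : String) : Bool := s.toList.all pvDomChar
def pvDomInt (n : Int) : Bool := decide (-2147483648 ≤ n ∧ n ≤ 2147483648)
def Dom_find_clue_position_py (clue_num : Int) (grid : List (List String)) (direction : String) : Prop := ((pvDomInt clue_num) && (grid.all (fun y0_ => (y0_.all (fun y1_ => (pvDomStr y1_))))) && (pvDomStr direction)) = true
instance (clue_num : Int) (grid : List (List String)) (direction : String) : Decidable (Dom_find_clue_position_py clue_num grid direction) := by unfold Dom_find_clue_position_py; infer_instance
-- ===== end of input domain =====

-- B replaces A's per-cell neighbour test by run decomposition: rows and columns are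
-- split into maximal runs of non-"." cells (a word starts exactly at the first cell of
-- a run of length ≥ 2), the column starts are inverted into per-row lists, and the
-- clue_num-th start in row-major order is returned (objective: alternative algorithm).

-- ===== PORT A =====
-- cell lookup grid[r][c]: indices here are always nonnegative and, under
-- Pre_find_clue_position_py and the loop bounds, in range, where getD is exact.
def pvCell (grid : List (List String)) (r c : Nat) : String := (grid.getD r []).getD c ""

-- one iteration of A's inner-loop body; an already-found result (early return) is carried through
def pvStepA (clue_num : Int) (grid : List (List String)) (height width : Nat)
    (st : Int × Option (Int × Int)) (r c : Nat) : Int × Option (Int × Int) :=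
  match st.2 with
  | some _ => st
  | none =>
    if pvCell grid r c = "." then st
    else
      let starts_across := (c == 0 || pvCell grid r (c - 1) == ".")
                            && decide (c + 1 < width) && (pvCell grid r (c + 1) != ".")
      let starts_down := (r == 0 || pvCell grid (r - 1) c == ".")
                            && decide (r + 1 < height) && (pvCell grid (r + 1) c != ".")
      if starts_across || starts_down then
        if st.1 = clue_num then (st.1, some ((r : Int), (c : Int)))
        else (st.1 + 1, none)
      else st

def find_clue_position_py (clue_num : Int) (grid : List (List String)) (direction : String) : Option (Int × Int) :=
  let height := grid.length
  let width := if height > 0 then (grid.headD []).length else 0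
  ((List.range height).foldl (fun st r =>
      (List.range width).foldl (fun st c => pvStepA clue_num grid height width st r c) st)
    (1, none)).2

-- ===== PORT B =====
-- B's helper _run_starts(line, i): start indices (offset by i) of maximal runs of
-- ≥ 2 consecutive non-"." cells; the inner `while k < len(line) and line[k] != "."`
-- that extends the run is ported as takeWhile/dropWhile of the same predicate.
def runStarts (line : List String) (i : Nat) : List Nat :=
  match line with
  | [] => []
  | cell :: rest =>
    if cell = "." then runStarts rest (i + 1)
    else
      -- k = final value of the while-loop counter = length of the run starting here
      let k := 1 + (rest.takeWhile (fun s => s != ".")).length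
      -- line[k:] = rest with the remaining run cells dropped
      let tail := runStarts (rest.dropWhile (fun s => s != ".")) (i + k)
      if 2 ≤ k then i :: tail else tail
termination_by line.length
decreasing_by
  · simp
  · have := List.length_dropWhile_le (fun s => s != ".") rest
    simp only [List.length_cons]
    omega

-- downs[r].append(c) on the list-of-lists downs (r is an index into a column, so
-- always < height = downs.length, where List.set is Python's downs[r] assignment)
def find_clue_position_py_alt (clue_num : Int) (grid : List (List String)) (direction : String) : Option (Int × Int) :=
  let height := grid.length
  let width := if height > 0 then (grid.headD []).length else 0
  let rows := grid.map (fun row => row.take width)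
  let downs := (List.range width).foldl (fun downs c =>
      (runStarts ((List.range height).map (fun r => (rows.getD r []).getD c "")) 0).foldl
        (fun downs r => downs.set r (downs.getD r [] ++ [c])) downs)
    ((List.range height).map (fun _ => ([] : List Nat)))
  let positions := (List.range height).flatMap (fun r =>
      (PySem.List.sorted (PySem.Set.ofList (runStarts (rows.getD r []) 0 ++ downs.getD r [])) (fun x => x) false).map
        (fun (c : Nat) => ((r : Int), (c : Int))))
  if 1 ≤ clue_num ∧ clue_num ≤ (positions.length : Int)
  then PySem.List.pyGet? positions (clue_num - 1)
  else none

-- ===== PRECONDITION & SPEC =====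
-- Pre_ excludes ragged grids with a row shorter than the first row: on such grids A
-- usually raises IndexError; on some of them A returns early before reaching the short
-- row (see the cite) while B, which always scans the whole grid, raises there.
def Pre_find_clue_position_py (clue_num : Int) (grid : List (List String)) (direction : String) : Prop :=
  ∀ row ∈ grid, (grid.headD []).length ≤ row.length
instance (clue_num : Int) (grid : List (List String)) (direction : String) : Decidable (Pre_find_clue_position_py clue_num grid direction) := by unfold Pre_find_clue_position_py; infer_instance

def pvWitness_find_clue_position_py : Int × List (List String) × String :=
  (2, [["A", "A", "."], [".", "B", "C"], ["D", "E", "F"]], "down")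

def Spec_find_clue_position_py (clue_num : Int) (grid : List (List String)) (direction : String) (out : Option (Int × Int)) : Prop := out = find_clue_position_py_alt clue_num grid direction
instance (clue_num : Int) (grid : List (List String)) (direction : String) (out : Option (Int × Int)) : Decidable (Spec_find_clue_position_py clue_num grid direction out) := by unfold Spec_find_clue_position_py; infer_instance

-- ===== CLAIM (what is proved, stated in full; the proofs are below) =====
def Claim_equal_find_clue_position_py : Prop := ∀ (clue_num : Int) (grid : List (List String)) (direction : String), Dom_find_clue_position_py clue_num grid direction → Pre_find_clue_position_py clue_num grid direction → Spec_find_clue_position_py clue_num grid direction (find_clue_position_py clue_num grid direction)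

-- ===== LEMMAS AND PROOFS =====

-- the numbered-square predicate A tests per cell (proof-side vocabulary)
def pvStartsWord (grid : List (List String)) (height width r c : Nat) : Bool :=
  if pvCell grid r c = "." then false
  else
    ((c == 0 || pvCell grid r (c - 1) == ".")
        && decide (c + 1 < width) && (pvCell grid r (c + 1) != "."))
    || ((r == 0 || pvCell grid (r - 1) c == ".")
        && decide (r + 1 < height) && (pvCell grid (r + 1) c != "."))

-- "index k starts a run of length ≥ 2 in line" (out-of-range reads default to ".")
def pvStartsRun (line : List String) (k : Nat) : Bool :=
  (line.getD k "." != ".") && (k == 0 || line.getD (k - 1) "." == ".")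
    && (line.getD (k + 1) "." != ".")

theorem pvStartsRun_cons_dot (rest : List String) (k : Nat) :
    pvStartsRun ("." :: rest) (k + 1) = pvStartsRun rest k := by
  cases k <;> simp [pvStartsRun]

-- reading within the run: positions 0 .. t.length of cell :: (t ++ d) are non-"."
theorem getD_run_ne (cell : String) (t d : List String)
    (hcell : (cell != ".") = true) (ht : ∀ x ∈ t, (x != ".") = true)
    (j : Nat) (hj : j < 1 + t.length) :
    (((cell :: (t ++ d)).getD j ".") != ".") = true := by
  cases j with
  | zero => simpa using hcell
  | succ j =>
    rw [List.getD_cons_succ, List.getD_append _ _ _ j (by omega),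
        List.getD_eq_getElem _ _ (by omega)]
    exact ht _ (List.getElem_mem _)

-- reading past the run: position 1 + t.length + m of cell :: (t ++ d) is d's m-th cell
theorem getD_run_shift (cell : String) (t d : List String) (m : Nat) :
    (cell :: (t ++ d)).getD (1 + t.length + m) "." = d.getD m "." := by
  have h : 1 + t.length + m = (t.length + m) + 1 := by omega
  rw [h, List.getD_cons_succ, List.getD_append_right _ _ _ _ (by omega)]
  congr 1
  omega

-- the head cell left after dropping a run is "." (or the list ended)
theorem dropWhile_dot_getD (l : List String) :
    (l.dropWhile (fun s => s != ".")).getD 0 "." = "." := by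
  induction l with
  | nil => rfl
  | cons x l ih =>
    rw [List.dropWhile_cons]
    by_cases hx : (x != ".") = true
    · simp only [hx, if_true]
      exact ih
    · simp at hx
      simp [hx]

-- pvStartsRun across the run boundary
theorem pvStartsRun_shift (cell : String) (t d : List String)
    (hcell : (cell != ".") = true) (ht : ∀ x ∈ t, (x != ".") = true)
    (hd : d.getD 0 "." = ".") (m : Nat) :
    pvStartsRun (cell :: (t ++ d)) (1 + t.length + m) = pvStartsRun d m := by
  cases m with
  | zero =>
    have e0 : (cell :: (t ++ d)).getD (1 + t.length + 0) "." = "." := by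
      rw [getD_run_shift]; exact hd
    simp only [pvStartsRun, e0, hd]
    simp
  | succ m =>
    simp only [pvStartsRun]
    rw [show 1 + t.length + (m + 1) - 1 = 1 + t.length + m from by omega,
        show 1 + t.length + (m + 1) + 1 = 1 + t.length + (m + 2) from by omega,
        getD_run_shift, getD_run_shift, getD_run_shift,
        show (1 + t.length + (m + 1) == 0) = false from by simp,
        show (m + 1 == 0) = false from by simp,
        show m + 1 - 1 = m from by omega,
        show m + 1 + 1 = m + 2 from by omega]

-- characterization of B's run decomposition: runStarts line i lists exactly the
-- pvStartsRun indices of line, shifted by i, in increasing order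
theorem runStarts_eq_aux : ∀ (n : Nat) (line : List String), line.length ≤ n → ∀ (i : Nat),
    runStarts line i = (List.range line.length).filterMap
      (fun k => if pvStartsRun line k then some (i + k) else none) := by
  intro n
  induction n with
  | zero =>
    intro line h i
    have : line = [] := by cases line <;> simp_all
    subst this
    simp [runStarts]
  | succ n ih =>
    intro line h i
    match line with
    | [] => simp [runStarts]
    | cell :: rest =>
      rw [runStarts]
      by_cases hc : cell = "."
      · subst hc
        rw [if_pos rfl, ih rest (by simpa using h) (i + 1)]
        rw [List.length_cons, List.range_succ_eq_map, List.filterMap_cons]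
        have h0 : pvStartsRun ("." :: rest) 0 = false := by simp [pvStartsRun]
        rw [h0]
        simp only [Bool.false_eq_true, if_false, List.filterMap_map]
        refine (List.filterMap_congr ?_)
        intro k _
        simp only [Function.comp_apply, Nat.succ_eq_add_one, pvStartsRun_cons_dot]
        by_cases hk : pvStartsRun rest k
        · simp [hk]; omega
        · simp [hk]
      · rw [if_neg hc]
        simp only []
        set t := rest.takeWhile (fun s => s != ".") with hts
        set d := rest.dropWhile (fun s => s != ".") with hds
        have htd : t ++ d = rest := List.takeWhile_append_dropWhile
        have hdlen : d.length ≤ rest.length := List.length_dropWhile_le _ _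
        have hrlen : rest.length = t.length + d.length := by
          rw [← htd, List.length_append]
        have hcell : (cell != ".") = true := by simp [hc]
        have ht : ∀ x ∈ t, (x != ".") = true := by
          intro x hx
          rw [hts] at hx
          have := List.mem_takeWhile_imp hx
          exact this
        have hd0 : d.getD 0 "." = "." := by
          rw [hds]
          exact dropWhile_dot_getD rest
        have hline : cell :: rest = cell :: (t ++ d) := by rw [htd]
        have hrest : rest.length ≤ n := by
          simp only [List.length_cons] at h
          omega
        rw [ih d (by omega) (i + (1 + t.length))]
        -- split the index range at the end of the first run
        rw [List.length_cons, show rest.length + 1 = (1 + t.length) + d.length from by omega,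
            List.range_add, List.filterMap_append, List.filterMap_map]
        -- the tail part: indices 1 + t.length + m correspond to d's indices m
        have hpartB : (List.range d.length).filterMap
            ((fun k => if pvStartsRun (cell :: rest) k then some (i + k) else none)
              ∘ (fun x => 1 + t.length + x))
            = (List.range d.length).filterMap
              (fun k => if pvStartsRun d k then some (i + (1 + t.length) + k) else none) := by
          refine List.filterMap_congr ?_
          intro m _
          simp only [Function.comp_apply]
          rw [hline, pvStartsRun_shift cell t d hcell ht hd0 m]
          by_cases hm : pvStartsRun d m
          · simp [hm, Nat.add_assoc]
          · simp [hm]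
        rw [hpartB]
        -- the head part: index 0 starts iff the run has length ≥ 2; indices 1 .. t.length never start
        have hpartA : (List.range (1 + t.length)).filterMap
            (fun k => if pvStartsRun (cell :: rest) k then some (i + k) else none)
            = if 2 ≤ 1 + t.length then [i] else [] := by
          rw [show 1 + t.length = t.length + 1 from by omega, List.range_succ_eq_map,
              List.filterMap_cons, List.filterMap_map]
          have hnone : (List.range t.length).filterMap
              ((fun k => if pvStartsRun (cell :: rest) k then some (i + k) else none)
                ∘ Nat.succ) = [] := by
            rw [List.filterMap_eq_nil_iff]
            intro j hj
            rw [List.mem_range] at hj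
            have hne : (((cell :: rest).getD j ".") != ".") = true := by
              rw [hline]
              exact getD_run_ne cell t d hcell ht j (by omega)
            have hmid : ((cell :: rest).getD (j + 1 - 1) "." == ".") = false := by
              simp only [Nat.add_sub_cancel]
              revert hne
              cases hh : (cell :: rest).getD j "." == "." <;> simp_all
            have : pvStartsRun (cell :: rest) (j + 1) = false := by
              simp only [pvStartsRun, hmid]
              simp
            simp [this]
          rw [hnone]
          have hhead : pvStartsRun (cell :: rest) 0 = decide (2 ≤ 1 + t.length) := by
            simp only [pvStartsRun, List.getD_cons_zero, List.getD_cons_succ]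
            cases rest with
            | nil =>
              have : t = ([] : List String) := by simp [hts]
              simp [hcell, this]
            | cons y rest' =>
              by_cases hy : y = "."
              · have htnil : t = ([] : List String) := by simp [hts, List.takeWhile, hy]
                subst hy
                simp [hcell, htnil]
              · have htcons : t = y :: rest'.takeWhile (fun s => s != ".") := by
                  simp [hts, hy]
                have h2 : 2 ≤ 1 + t.length := by rw [htcons]; simp; omega
                simp [hcell, hy, h2]
          rw [hhead]
          by_cases h2 : 2 ≤ 1 + t.length
          · have ht0 : ¬ t = [] := by
              intro he
              rw [he] at h2
              simp at h2
            simp [h2, ht0]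
          · have ht0 : t = [] := by
              cases hte : t with
              | nil => rfl
              | cons a l =>
                exfalso
                apply h2
                rw [hte]
                simp
                omega
            simp [ht0]
        rw [hpartA]
        by_cases h2 : 2 ≤ 1 + t.length
        · rw [if_pos h2, if_pos h2]
          rfl
        · rw [if_neg h2, if_neg h2]
          rfl

theorem runStarts_eq (line : List String) (i : Nat) :
    runStarts line i = (List.range line.length).filterMap
      (fun k => if pvStartsRun line k then some (i + k) else none) :=
  runStarts_eq_aux line.length line (le_refl _) i

theorem mem_runStarts (line : List String) (i c : Nat) :
    c ∈ runStarts line i ↔ ∃ k, k < line.length ∧ pvStartsRun line k ∧ c = i + k := by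
  rw [runStarts_eq]
  simp only [List.mem_filterMap, List.mem_range]
  constructor
  · rintro ⟨k, hk, hf⟩
    by_cases h : pvStartsRun line k
    · simp [h] at hf; exact ⟨k, hk, h, hf.symm⟩
    · simp [h] at hf
  · rintro ⟨k, hk, h, rfl⟩
    exact ⟨k, hk, by simp [h]⟩

theorem runStarts_pairwise (line : List String) (i : Nat) :
    (runStarts line i).Pairwise (fun a b => a < b) := by
  rw [runStarts_eq]
  refine List.Pairwise.filterMap _ ?_ List.pairwise_lt_range
  intro a a' h b hb b' hb'
  by_cases ha : pvStartsRun line a <;> by_cases ha' : pvStartsRun line a' <;>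
    simp [ha, ha'] at hb hb'
  omega

theorem runStarts_nodup (line : List String) (i : Nat) :
    (runStarts line i).Nodup :=
  (runStarts_pairwise line i).imp Nat.ne_of_lt

theorem mem_runStarts_lt (line : List String) (i c : Nat) (h : c ∈ runStarts line i) :
    c < i + line.length := by
  rw [mem_runStarts] at h
  obtain ⟨k, hk, -, rfl⟩ := h
  omega

-- inner loop of the downs construction: append c to downs[r'] for every r' in starts
theorem inner_fold_getD (starts : List Nat) (c : Nat) :
    ∀ (ds : List (List Nat)), starts.Nodup → (∀ r' ∈ starts, r' < ds.length) →
      ∀ r < ds.length,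
      (starts.foldl (fun ds r' => ds.set r' (ds.getD r' [] ++ [c])) ds).getD r []
        = ds.getD r [] ++ (if r ∈ starts then [c] else []) := by
  induction starts with
  | nil => intro ds _ _ r _; simp
  | cons r0 rest ih =>
    intro ds hnd hlt r hr
    simp only [List.foldl_cons]
    have h0 : r0 < ds.length := hlt r0 (by simp)
    have hlen : (ds.set r0 (ds.getD r0 [] ++ [c])).length = ds.length := List.length_set
    rw [ih _ (List.nodup_cons.mp hnd).2 (fun r' hr' => by rw [hlen]; exact hlt r' (by simp [hr'])) r (by omega)]
    by_cases hrr : r = r0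
    · subst hrr
      have hnr : r ∉ rest := (List.nodup_cons.mp hnd).1
      simp [hnr, List.getD_eq_getElem?_getD, h0]
    · have : (ds.set r0 (ds.getD r0 [] ++ [c])).getD r [] = ds.getD r [] := by
        simp only [List.getD_eq_getElem?_getD]
        rw [List.getElem?_set_ne (fun h => hrr h.symm)]
      rw [this]
      simp [hrr]

theorem inner_fold_length (starts : List Nat) (c : Nat) (ds : List (List Nat)) :
    (starts.foldl (fun ds r' => ds.set r' (ds.getD r' [] ++ [c])) ds).length = ds.length := by
  induction starts generalizing ds with
  | nil => rfl
  | cons r0 rest ih => rw [List.foldl_cons, ih, List.length_set]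

-- outer loop: after processing the columns cs, downs[r] holds exactly those c with
-- r a start of column c, in the order of cs
theorem outer_fold_getD (g : Nat → List Nat) (H : Nat)
    (hg : ∀ c, (g c).Nodup ∧ ∀ r' ∈ g c, r' < H) (cs : List Nat) :
    ∀ (ds : List (List Nat)), ds.length = H → ∀ r < H,
      ((cs.foldl (fun ds c => (g c).foldl
          (fun ds r' => ds.set r' (ds.getD r' [] ++ [c])) ds) ds).getD r [])
        = ds.getD r [] ++ cs.filter (fun c => decide (r ∈ g c)) := by
  induction cs with
  | nil => intro ds _ r _; simp
  | cons c0 rest ih =>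
    intro ds hds r hr
    simp only [List.foldl_cons]
    have hlen : ((g c0).foldl (fun ds r' => ds.set r' (ds.getD r' [] ++ [c0])) ds).length = H := by
      rw [inner_fold_length]; exact hds
    rw [ih _ hlen r hr,
        inner_fold_getD (g c0) c0 ds (hg c0).1 (fun r' h => hds ▸ (hg c0).2 r' h) r (by omega)]
    by_cases hm : r ∈ g c0 <;> simp [hm]

-- filterMap with an if-some is map-after-filter
theorem filterMap_ite_eq_map_filter {α β : Type} (p : α → Bool) (f : α → β) (l : List α) :
    l.filterMap (fun x => if p x then some (f x) else none) = (l.filter p).map f := by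
  induction l with
  | nil => rfl
  | cons x l ih =>
    by_cases h : p x <;> simp [h, ih]

-- A's step on an undecided state, phrased through pvStartsWord
theorem pvStepA_none (clue_num : Int) (grid : List (List String)) (height width : Nat)
    (n : Int) (r c : Nat) :
    pvStepA clue_num grid height width (n, none) r c
      = if pvStartsWord grid height width r c then
          (if n = clue_num then (n, some ((r : Int), (c : Int))) else (n + 1, none))
        else (n, none) := by
  simp only [pvStepA, pvStartsWord]
  split_ifs <;> simp_all

-- once A has found its answer, the rest of the fold is the identity
theorem pvFoldA_some (clue_num : Int) (grid : List (List String)) (height width : Nat)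
    (ps : List (Nat × Nat)) (n : Int) (v : Int × Int) :
    ps.foldl (fun st rc => pvStepA clue_num grid height width st rc.1 rc.2) (n, some v)
      = (n, some v) := by
  induction ps with
  | nil => rfl
  | cons q ps ih => simpa [pvStepA] using ih

-- core invariant of A: the counting fold started at counter n returns the
-- (clue_num - n)-th element of the row-major list of numbered squares
theorem pvFoldA_char (clue_num : Int) (grid : List (List String)) (height width : Nat)
    (ps : List (Nat × Nat)) (n : Int) :
    (ps.foldl (fun st rc => pvStepA clue_num grid height width st rc.1 rc.2) (n, none)).2
      = (if n ≤ clue_num then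
          (ps.filterMap (fun rc =>
            if pvStartsWord grid height width rc.1 rc.2
            then some ((rc.1 : Int), (rc.2 : Int)) else none))[(clue_num - n).toNat]?
        else none) := by
  induction ps generalizing n with
  | nil => simp
  | cons q ps ih =>
    simp only [List.foldl_cons, List.filterMap_cons]
    rw [pvStepA_none]
    by_cases hq : pvStartsWord grid height width q.1 q.2
    · simp only [hq, if_true]
      by_cases hn : n = clue_num
      · rw [if_pos hn, pvFoldA_some]
        simp [hn]
      · rw [if_neg hn, ih]
        by_cases hle : n ≤ clue_num
        · have hle' : n + 1 ≤ clue_num := by omega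
          have hs : (clue_num - n).toNat = (clue_num - (n + 1)).toNat + 1 := by omega
          simp [hle, hle', hs]
        · have hle' : ¬ n + 1 ≤ clue_num := by omega
          simp [hle, hle']
    · simp only [hq, Bool.false_eq_true, if_false]
      exact ih n

-- reading row r truncated to width, with out-of-range reads defaulting to "."
theorem pvRowline_getD (grid : List (List String)) (width r j : Nat)
    (hr : r < grid.length) (hw : width ≤ (grid.getD r []).length) :
    ((grid.map (fun row => row.take width)).getD r []).getD j "."
      = if j < width then pvCell grid r j else "." := by
  have hw' : width ≤ grid[r].length := by
    rwa [List.getD_eq_getElem _ _ hr] at hw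
  have hmap : (grid.map (fun row => row.take width)).getD r [] = grid[r].take width := by
    rw [List.getD_eq_getElem _ _ (by simpa using hr), List.getElem_map]
  rw [hmap]
  by_cases hj : j < width
  · rw [if_pos hj, pvCell, List.getD_eq_getElem _ _ hr,
        List.getD_eq_getElem _ _ (by simp [List.length_take]; omega),
        List.getD_eq_getElem _ _ (by omega), List.getElem_take]
  · rw [if_neg hj]
    apply List.getD_eq_default
    simp [List.length_take]
    omega

theorem pvRowline_getD' (grid : List (List String)) (width r c : Nat)
    (hr : r < grid.length) (hw : width ≤ (grid.getD r []).length) (hc : c < width) :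
    ((grid.map (fun row => row.take width)).getD r []).getD c "" = pvCell grid r c := by
  have hw' : width ≤ grid[r].length := by
    rwa [List.getD_eq_getElem _ _ hr] at hw
  have hmap : (grid.map (fun row => row.take width)).getD r [] = grid[r].take width := by
    rw [List.getD_eq_getElem _ _ (by simpa using hr), List.getElem_map]
  rw [hmap, pvCell, List.getD_eq_getElem _ _ hr,
      List.getD_eq_getElem _ _ (by simp [List.length_take]; omega),
      List.getD_eq_getElem _ _ (by omega), List.getElem_take]

theorem pvRowline_length (grid : List (List String)) (width r : Nat)
    (hr : r < grid.length) (hw : width ≤ (grid.getD r []).length) :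
    ((grid.map (fun row => row.take width)).getD r []).length = width := by
  have hw' : width ≤ grid[r].length := by
    rwa [List.getD_eq_getElem _ _ hr] at hw
  rw [List.getD_eq_getElem _ _ (by simpa using hr), List.getElem_map]
  simp [List.length_take]
  omega

-- reading column c (as built by B), with out-of-range reads defaulting to "."
theorem pvCol_getD (grid : List (List String)) (height width c j : Nat)
    (hh : height = grid.length) (hc : c < width)
    (hwle : ∀ r' < height, width ≤ (grid.getD r' []).length) :
    (((List.range height).map
        (fun r' => ((grid.map (fun row => row.take width)).getD r' []).getD c "")).getD j ".")
      = if j < height then pvCell grid j c else "." := by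
  by_cases hj : j < height
  · rw [if_pos hj, List.getD_eq_getElem _ _ (by simpa using hj), List.getElem_map,
        List.getElem_range]
    exact pvRowline_getD' grid width j c (by omega) (hwle j hj) hc
  · rw [if_neg hj]
    apply List.getD_eq_default
    simp
    omega

-- a row start of B is A's starts_across (plus the non-black test)
theorem pvStartsRun_row (grid : List (List String)) (width r c : Nat)
    (hr : r < grid.length) (hw : width ≤ (grid.getD r []).length) (hc : c < width) :
    pvStartsRun ((grid.map (fun row => row.take width)).getD r []) c
      = ((pvCell grid r c != ".")
          && ((c == 0 || pvCell grid r (c - 1) == ".")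
                && decide (c + 1 < width) && (pvCell grid r (c + 1) != "."))) := by
  have g : ∀ j, ((grid.map (fun row => row.take width)).getD r []).getD j "."
      = if j < width then pvCell grid r j else "." :=
    fun j => pvRowline_getD grid width r j hr hw
  rw [pvStartsRun, g, g, g, if_pos hc]
  by_cases h1 : c + 1 < width
  · rw [if_pos h1]
    by_cases h0 : c = 0
    · subst h0
      simp [h1]
    · rw [if_pos (show c - 1 < width by omega)]
      simp [h1, Bool.and_assoc]
  · rw [if_neg h1]
    simp [h1]

-- a column start of B is A's starts_down (plus the non-black test)
theorem pvStartsRun_col (grid : List (List String)) (height width r c : Nat)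
    (hh : height = grid.length) (hc : c < width) (hr : r < height)
    (hwle : ∀ r' < height, width ≤ (grid.getD r' []).length) :
    pvStartsRun ((List.range height).map
        (fun r' => ((grid.map (fun row => row.take width)).getD r' []).getD c "")) r
      = ((pvCell grid r c != ".")
          && ((r == 0 || pvCell grid (r - 1) c == ".")
                && decide (r + 1 < height) && (pvCell grid (r + 1) c != "."))) := by
  have g : ∀ j, (((List.range height).map
      (fun r' => ((grid.map (fun row => row.take width)).getD r' []).getD c "")).getD j ".")
      = if j < height then pvCell grid j c else "." :=
    fun j => pvCol_getD grid height width c j hh hc hwle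
  rw [pvStartsRun, g, g, g, if_pos hr]
  by_cases h1 : r + 1 < height
  · rw [if_pos h1]
    by_cases h0 : r = 0
    · subst h0
      simp [h1]
    · rw [if_pos (show r - 1 < height by omega)]
      simp [h1, Bool.and_assoc]
  · rw [if_neg h1]
    simp [h1]

theorem flatMap_congr_mem {α β : Type} (l : List α) (f g : α → List β)
    (h : ∀ a ∈ l, f a = g a) : l.flatMap f = l.flatMap g := by
  rw [List.flatMap_def, List.flatMap_def, List.map_congr_left h]

theorem mem_runStarts_zero (line : List String) (c : Nat) :
    c ∈ runStarts line 0 ↔ c < line.length ∧ pvStartsRun line c := by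
  rw [mem_runStarts]
  constructor
  · rintro ⟨k, hk, hs, rfl⟩
    rw [Nat.zero_add]
    exact ⟨hk, hs⟩
  · rintro ⟨h1, h2⟩
    exact ⟨c, h1, h2, by omega⟩

-- the numbered-square predicate splits into the across and down parts B computes
theorem pvStartsWord_eq (grid : List (List String)) (height width r c : Nat) :
    pvStartsWord grid height width r c
      = (((pvCell grid r c != ".")
            && ((c == 0 || pvCell grid r (c - 1) == ".")
                  && decide (c + 1 < width) && (pvCell grid r (c + 1) != ".")))
         || ((pvCell grid r c != ".")
            && ((r == 0 || pvCell grid (r - 1) c == ".")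
                  && decide (r + 1 < height) && (pvCell grid (r + 1) c != ".")))) := by
  rw [pvStartsWord]
  by_cases h : pvCell grid r c = "."
  · simp [h]
  · have hb : (pvCell grid r c != ".") = true := by simp [h]
    simp [h, hb]

-- each row of B's positions is exactly A's numbered squares of that row, in order
theorem pvRow_eq (grid : List (List String)) (height width : Nat)
    (hh : height = grid.length)
    (hwle : ∀ r' < height, width ≤ (grid.getD r' []).length)
    (r : Nat) (hr : r < height) :
    PySem.List.sorted (PySem.Set.ofList (runStarts ((grid.map (fun row => row.take width)).getD r []) 0
        ++ ((List.range width).foldl (fun downs c =>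
            (runStarts ((List.range height).map
                (fun r' => ((grid.map (fun row => row.take width)).getD r' []).getD c "")) 0).foldl
              (fun downs r' => downs.set r' (downs.getD r' [] ++ [c])) downs)
          ((List.range height).map (fun _ => ([] : List Nat)))).getD r []))
      (fun x => x) false
      = (List.range width).filter (fun c => pvStartsWord grid height width r c) := by
  have hds0len : ((List.range height).map (fun _ => ([] : List Nat))).length = height := by simp
  have hds0getD : ((List.range height).map (fun _ => ([] : List Nat))).getD r [] = [] := by
    simp only [List.getD_eq_getElem?_getD, List.getElem?_map]
    cases (List.range height)[r]? <;> simp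
  have hg : ∀ c, (runStarts ((List.range height).map
        (fun r' => ((grid.map (fun row => row.take width)).getD r' []).getD c "")) 0).Nodup
      ∧ ∀ r' ∈ runStarts ((List.range height).map
        (fun r' => ((grid.map (fun row => row.take width)).getD r' []).getD c "")) 0, r' < height := by
    intro c
    refine ⟨runStarts_nodup _ _, fun r' h => ?_⟩
    have := mem_runStarts_lt _ _ _ h
    simpa using this
  have hdowns := outer_fold_getD
      (fun c => runStarts ((List.range height).map
        (fun r' => ((grid.map (fun row => row.take width)).getD r' []).getD c "")) 0)
      height hg (List.range width)
      ((List.range height).map (fun _ => ([] : List Nat))) hds0len r hr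
  rw [hds0getD, List.nil_append] at hdowns
  rw [hdowns]
  -- both sides are strictly increasing rearrangements of the same set of columns
  have hpw : ((List.range width).filter
      (fun c => pvStartsWord grid height width r c)).Pairwise (fun a b => a < b) :=
    List.Pairwise.sublist List.filter_sublist List.pairwise_lt_range
  refine PySem.List.sorted_eq_of_perm_of_pairwise_lt _ _ _ ?_ (by simpa using hpw)
  rw [List.perm_ext_iff_of_nodup (hpw.imp Nat.ne_of_lt) (PySem.Set.nodup_ofList _)]
  intro c
  rw [List.mem_filter, List.mem_range, PySem.Set.mem_ofList, List.mem_append]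
  have hAiff : c ∈ runStarts ((grid.map (fun row => row.take width)).getD r []) 0
      ↔ (c < width ∧ ((pvCell grid r c != ".")
          && ((c == 0 || pvCell grid r (c - 1) == ".")
                && decide (c + 1 < width) && (pvCell grid r (c + 1) != "."))) = true) := by
    rw [mem_runStarts_zero, pvRowline_length grid width r (by omega) (hwle r hr)]
    constructor
    · rintro ⟨hc, hs⟩
      exact ⟨hc, by rwa [pvStartsRun_row grid width r c (by omega) (hwle r hr) hc] at hs⟩
    · rintro ⟨hc, hs⟩
      exact ⟨hc, by rwa [pvStartsRun_row grid width r c (by omega) (hwle r hr) hc]⟩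
  have hDiff : c ∈ (List.range width).filter (fun c => decide (r ∈ runStarts ((List.range height).map
        (fun r' => ((grid.map (fun row => row.take width)).getD r' []).getD c "")) 0))
      ↔ (c < width ∧ ((pvCell grid r c != ".")
          && ((r == 0 || pvCell grid (r - 1) c == ".")
                && decide (r + 1 < height) && (pvCell grid (r + 1) c != "."))) = true) := by
    rw [List.mem_filter, List.mem_range, decide_eq_true_iff, mem_runStarts_zero]
    constructor
    · rintro ⟨hc, -, hs⟩
      exact ⟨hc, by rwa [pvStartsRun_col grid height width r c hh hc hr hwle] at hs⟩
    · rintro ⟨hc, hs⟩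
      refine ⟨hc, by simpa using hr, ?_⟩
      rwa [pvStartsRun_col grid height width r c hh hc hr hwle]
  rw [hAiff, hDiff, pvStartsWord_eq]
  constructor
  · intro h0
    rcases Bool.or_eq_true_iff.mp h0.2 with h | h
    · exact Or.inl ⟨h0.1, h⟩
    · exact Or.inr ⟨h0.1, h⟩
  · intro h0
    rcases h0 with h0 | h0
    · exact ⟨h0.1, by simp [h0.2]⟩
    · exact ⟨h0.1, by simp [h0.2]⟩

-- ===== VERDICT (by name: the statement is the Claim_ definition above) =====
theorem find_clue_position_py_spec : Claim_equal_find_clue_position_py := by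
  intro clue_num grid direction _ hPre
  unfold Spec_find_clue_position_py find_clue_position_py find_clue_position_py_alt
  simp only []
  set height := grid.length with hh
  set width := (if height > 0 then (grid.headD []).length else 0) with hw
  have hwle : ∀ r' < height, width ≤ (grid.getD r' []).length := by
    intro r' hr'
    have hmem : grid.getD r' [] ∈ grid := by
      rw [List.getD_eq_getElem _ _ (by omega)]
      exact List.getElem_mem _
    have hle := hPre _ hmem
    rw [hw, if_pos (by omega)]
    exact hle
  -- A's double loop is a single fold over the row-major pairs
  rw [show (fun (st : Int × Option (Int × Int)) r =>
        (List.range width).foldl (fun st c => pvStepA clue_num grid height width st r c) st)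
      = (fun st r => ((List.range width).map (fun c => (r, c))).foldl
          (fun st rc => pvStepA clue_num grid height width st rc.1 rc.2) st) from by
    funext st r; rw [List.foldl_map]]
  rw [← List.foldl_flatMap, pvFoldA_char]
  rw [List.filterMap_flatMap]
  simp only [List.filterMap_map, Function.comp_def]
  -- B's per-row sorted sets are A's per-row numbered squares
  have hrow : ∀ r ∈ List.range height,
      (PySem.List.sorted (PySem.Set.ofList (runStarts ((grid.map (fun row => row.take width)).getD r []) 0
          ++ ((List.range width).foldl (fun downs c =>
              (runStarts ((List.range height).map
                  (fun r' => ((grid.map (fun row => row.take width)).getD r' []).getD c "")) 0).foldl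
                (fun downs r' => downs.set r' (downs.getD r' [] ++ [c])) downs)
            ((List.range height).map (fun _ => ([] : List Nat)))).getD r []))
        (fun x => x) false).map (fun (c : Nat) => ((r : Int), (c : Int)))
      = (List.range width).filterMap
          (fun c => if pvStartsWord grid height width r c then some ((r : Int), (c : Int)) else none) := by
    intro r hrm
    rw [pvRow_eq grid height width hh hwle r (List.mem_range.mp hrm),
        filterMap_ite_eq_map_filter]
  rw [flatMap_congr_mem (List.range height) _ _ hrow]
  set positions := (List.range height).flatMap (fun r =>
    (List.range width).filterMap (fun c =>
      if pvStartsWord grid height width r c then some ((r : Int), (c : Int)) else none))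
    with hp
  by_cases h1 : (1 : Int) ≤ clue_num
  · rw [if_pos h1]
    by_cases h2 : clue_num ≤ (positions.length : Int)
    · rw [if_pos ⟨h1, h2⟩,
        show PySem.List.pyGet? positions (clue_num - 1) = positions[(clue_num - 1).toNat]?
          from PySem.List.pyGet?_of_nonneg positions (by omega)]
    · rw [if_neg (by tauto)]
      exact List.getElem?_eq_none (by omega)
  · rw [if_neg h1, if_neg (by tauto)]
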